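-- pv_equiv track=rewrite | github.com/tupkalenkodi/DONE | 2023/stepping.py | all_stepping_nonrec
-- ===== SOURCE A (Python) =====
-- def all_stepping_nonrec(n):
--     generation = [(0,)]
--     for i in range(n - 1):
--         new_gen = []
--         for x in generation:
--             last = x[-1]
--             new_gen.append(x + (last - 1,))
--             new_gen.append(x + (last + 1,))
--         generation = new_gen
--     return generation
-- ===== SOURCE B (Python) =====
-- def all_stepping_nonrec(n):
--     if n <= 1:
--         return [(0,)]
--     m = n - 1
--     result = []
--     for i in range(1 << m):
--         seq = [0]
--         for k in range(m):
--             bit = (i >> (m - 1 - k)) & 1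
--             seq.append(seq[-1] + (1 if bit else -1))
--         result.append(tuple(seq))
--     return result
-- ===== Notes on version B (the rewrite author's own statement) =====
-- stated objective: alternative
-- what changed: B computes each length-n sequence directly from its index i in range(2**(n-1)) by decoding the n-1 bits of i MSB-first into -1/+1 steps and taking running sums, instead of A's breadth-first doubling of a maintained generation list.
import Mathlib
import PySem

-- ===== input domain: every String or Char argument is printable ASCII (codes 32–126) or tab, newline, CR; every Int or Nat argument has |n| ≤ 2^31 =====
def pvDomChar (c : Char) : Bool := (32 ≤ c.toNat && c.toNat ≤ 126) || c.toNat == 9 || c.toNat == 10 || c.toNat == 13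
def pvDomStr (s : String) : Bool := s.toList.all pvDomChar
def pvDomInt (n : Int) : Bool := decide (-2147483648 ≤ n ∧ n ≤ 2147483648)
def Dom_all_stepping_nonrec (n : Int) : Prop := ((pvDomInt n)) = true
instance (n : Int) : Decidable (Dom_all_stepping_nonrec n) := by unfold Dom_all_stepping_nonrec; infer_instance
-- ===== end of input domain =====

-- B replaces A's breadth-first doubling of a generation list by direct per-index bit decoding
-- (MSB-first, bit 0 ↦ step -1, bit 1 ↦ step +1, running prefix sums); same cost, alternative algorithm.

-- ===== PORT A =====
-- x[-1] on a tuple that is always nonempty: ported as (pyGet? x (-1)).getD 0 (the none case is unreachable).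
def all_stepping_nonrec (n : Int) : List (List Int) :=
  (PySem.List.pyRange 0 (n - 1) 1).foldl
    (fun generation _ =>
      generation.foldl
        (fun new_gen x =>
          let last := (PySem.List.pyGet? x (-1)).getD 0
          (new_gen ++ [x ++ [last - 1]]) ++ [x ++ [last + 1]])
        [])
    [[0]]

-- ===== PORT B =====
-- seq[-1] on the nonempty running list: ported as (pyGet? seq (-1)).getD 0 (the none case is unreachable).
def all_stepping_nonrec_alt (n : Int) : List (List Int) :=
  if n ≤ 1 then [[0]]
  else
    let m := (n - 1).toNat
    (List.range (2 ^ m)).map (fun i =>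
      (List.range m).foldl
        (fun seq k =>
          seq ++ [((PySem.List.pyGet? seq (-1)).getD 0) +
            (if (i >>> (m - 1 - k)) &&& 1 = 1 then (1 : Int) else -1)])
        [0])

-- ===== PRECONDITION & SPEC =====
def Spec_all_stepping_nonrec (n : Int) (out : List (List Int)) : Prop := out = all_stepping_nonrec_alt n
instance (n : Int) (out : List (List Int)) : Decidable (Spec_all_stepping_nonrec n out) := by unfold Spec_all_stepping_nonrec; infer_instance

-- ===== CLAIM (what is proved, stated in full; the proofs are below) =====
def Claim_equal_all_stepping_nonrec : Prop := ∀ (n : Int), Dom_all_stepping_nonrec n → Spec_all_stepping_nonrec n (all_stepping_nonrec n)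

-- ===== LEMMAS AND PROOFS =====

def pyLast (xs : List Int) : Int := (PySem.List.pyGet? xs (-1)).getD 0

def stepA (gen : List (List Int)) : List (List Int) :=
  gen.foldl (fun ng x => (ng ++ [x ++ [pyLast x - 1]]) ++ [x ++ [pyLast x + 1]]) []

def elemB (m i : Nat) : List Int :=
  (List.range m).foldl
    (fun seq k => seq ++ [pyLast seq + (if (i >>> (m - 1 - k)) &&& 1 = 1 then (1 : Int) else -1)])
    [0]

theorem foldl_const {α β : Type} (F : α → α) (init : α) (l : List β) :
    l.foldl (fun a _ => F a) init = F^[l.length] init := by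
  induction l generalizing init with
  | nil => rfl
  | cons x t ih => simp [List.foldl_cons, ih, Function.iterate_succ_apply]

theorem A_eq_iter (n : Int) : all_stepping_nonrec n = stepA^[(n - 1).toNat] [[0]] := by
  unfold all_stepping_nonrec
  have hbody : (fun (generation : List (List Int)) (_ : Int) =>
      generation.foldl
        (fun new_gen x =>
          let last := (PySem.List.pyGet? x (-1)).getD 0
          (new_gen ++ [x ++ [last - 1]]) ++ [x ++ [last + 1]])
        []) = fun g (_ : Int) => stepA g := by
    funext g x
    rfl
  rw [hbody, foldl_const stepA [[0]] (PySem.List.pyRange 0 (n - 1) 1)]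
  simp [PySem.List.length_pyRange_one]

theorem stepA_eq_flatMap (gen : List (List Int)) :
    stepA gen = gen.flatMap (fun x => [x ++ [pyLast x - 1], x ++ [pyLast x + 1]]) := by
  unfold stepA
  have h := PySem.List.foldl_append_eq_flatMap
    (fun x => [x ++ [pyLast x - 1], x ++ [pyLast x + 1]]) gen ([] : List (List Int))
  simpa using h

theorem shift_half (m k i b : Nat) (hk : k < m) (hb : b < 2) :
    (2 * i + b) >>> (m - k) = i >>> (m - 1 - k) := by
  have hm : m - k = (m - 1 - k) + 1 := by omega
  have h2 : (2 * i + b) / 2 = i := by omega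
  rw [hm, Nat.shiftRight_eq_div_pow, Nat.shiftRight_eq_div_pow, pow_succ',
    ← Nat.div_div_eq_div_mul, h2]

theorem elemB_succ (m i b : Nat) (hb : b < 2) :
    elemB (m + 1) (2 * i + b) = elemB m i ++ [pyLast (elemB m i) + (if b = 1 then (1 : Int) else -1)] := by
  unfold elemB
  rw [List.range_succ, List.foldl_append]
  have hcongr : (List.range m).foldl
      (fun seq k => seq ++ [pyLast seq + (if ((2 * i + b) >>> (m + 1 - 1 - k)) &&& 1 = 1 then (1 : Int) else -1)]) [0]
      = (List.range m).foldl
      (fun seq k => seq ++ [pyLast seq + (if (i >>> (m - 1 - k)) &&& 1 = 1 then (1 : Int) else -1)]) [0] := by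
    apply PySem.List.foldl_congr_mem
    intro acc k hkmem
    have hk : k < m := List.mem_range.mp hkmem
    have : m + 1 - 1 - k = m - k := by omega
    rw [this, shift_half m k i b hk hb]
  rw [hcongr]
  have hlastbit : (2 * i + b) >>> (m + 1 - 1 - m) = 2 * i + b := by
    simp
  simp only [List.foldl_cons, List.foldl_nil, hlastbit]
  have hand : (2 * i + b) &&& 1 = b := by
    rw [Nat.and_one_is_mod]; omega
  rw [hand]

theorem range_double (k : Nat) :
    List.range (2 * k) = (List.range k).flatMap (fun i => [2 * i, 2 * i + 1]) := by
  induction k with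
  | zero => rfl
  | succ k ih =>
    have h : 2 * (k + 1) = (2 * k + 1) + 1 := by omega
    rw [h, List.range_succ, List.range_succ, ih, List.range_succ]
    simp [List.flatMap_append]

theorem iter_eq (m : Nat) : stepA^[m] [[0]] = (List.range (2 ^ m)).map (elemB m) := by
  induction m with
  | zero => simp [elemB]
  | succ m ih =>
    rw [Function.iterate_succ_apply', ih, stepA_eq_flatMap, List.flatMap_map]
    have e0 : ∀ i, elemB m i ++ [pyLast (elemB m i) - 1] = elemB (m + 1) (2 * i) := by
      intro i
      have := elemB_succ m i 0 (by omega)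
      simp only [Nat.add_zero] at this
      rw [this]
      norm_num [sub_eq_add_neg]
    have e1 : ∀ i, elemB m i ++ [pyLast (elemB m i) + 1] = elemB (m + 1) (2 * i + 1) := by
      intro i
      have := elemB_succ m i 1 (by omega)
      rw [this]
      norm_num
    have hpow : (2 : Nat) ^ (m + 1) = 2 * 2 ^ m := by ring
    rw [hpow, range_double, List.map_flatMap]
    apply List.flatMap_congr
    intro i _
    simp [e0 i, e1 i]

theorem all_stepping_nonrec_le_one (n : Int) (h : n ≤ 1) : all_stepping_nonrec n = [[0]] := by
  rw [A_eq_iter]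
  have : (n - 1).toNat = 0 := by omega
  rw [this]
  rfl

-- ===== VERDICT (by name: the statement is the Claim_ definition above) =====
theorem all_stepping_nonrec_spec : Claim_equal_all_stepping_nonrec := by
  intro n _
  unfold Spec_all_stepping_nonrec all_stepping_nonrec_alt
  by_cases h : n ≤ 1
  · rw [if_pos h, all_stepping_nonrec_le_one n h]
  · rw [if_neg h, A_eq_iter, iter_eq]
    rfl
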